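-- pv_equiv track=rewrite | github.com/aishwaryaSahani/SearchEngine | SearchEngine/searchEngine.py | calculateInvertedIndexQuery
-- ===== SOURCE A (Python) =====
-- def calculateInvertedIndexQuery(query):
--     invertedIndex = {}
--     max = 0
--     for word in query:
--         if word not in invertedIndex:
--             invertedIndex[word] = 1
--         else:
--             invertedIndex[word] = invertedIndex[word]+1
--         if invertedIndex[word] > max:
--             max =  invertedIndex[word]
--     return invertedIndex, max
-- ===== SOURCE B (Python) =====
-- def calculateInvertedIndexQuery(query):
--     # Dedup-then-count: collect the distinct words in first-occurrence order,
--     # count each one over the whole query, then reduce for the max.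
--     seen = []
--     for w in query:
--         if w not in seen:
--             seen.append(w)
--     counts = {w: query.count(w) for w in seen}
--     m = 0
--     for c in counts.values():
--         if c > m:
--             m = c
--     return counts, m
-- ===== Notes on version B (the rewrite author's own statement) =====
-- stated objective: alternative
-- what changed: Replaces A's single incremental count-and-track-max loop with a dedup-then-count strategy: build the distinct-word list in first-occurrence order, count each distinct word with a full-list query.count scan (no incremental dict updates), then a separate max reduction over the values.
import Mathlib
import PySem

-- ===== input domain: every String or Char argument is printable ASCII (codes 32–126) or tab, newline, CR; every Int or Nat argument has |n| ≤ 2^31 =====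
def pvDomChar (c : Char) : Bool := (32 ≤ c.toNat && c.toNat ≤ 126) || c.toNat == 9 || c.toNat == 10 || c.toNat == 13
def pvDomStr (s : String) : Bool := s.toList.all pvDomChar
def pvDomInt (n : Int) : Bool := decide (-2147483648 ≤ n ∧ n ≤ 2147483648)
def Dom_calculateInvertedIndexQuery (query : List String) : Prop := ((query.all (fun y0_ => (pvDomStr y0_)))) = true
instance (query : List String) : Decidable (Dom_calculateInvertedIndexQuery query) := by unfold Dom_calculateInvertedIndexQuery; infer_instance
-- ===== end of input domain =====

-- B replaces A's incremental count-and-track-max loop by dedup-then-count: distinct words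
-- in first-occurrence order, a full-list count per distinct word, then a max reduction.

-- ===== PORT A =====
-- A keeps a dict and a running max, updating both inside one loop.
-- `invertedIndex[word]` after the update always succeeds in Python; `getD word 0` is exact there.
def calculateInvertedIndexQuery (query : List String) : (List (String × Int)) × Int :=
  let st := query.foldl
    (fun (st : PySem.Dict String Int × Int) word =>
      let d := if st.1.contains word = false
               then st.1.insert word 1
               else st.1.insert word (st.1.getD word 0 + 1)
      let m := if d.getD word 0 > st.2 then d.getD word 0 else st.2
      (d, m))
    (PySem.Dict.empty, 0)
  (st.1.items, st.2)

-- ===== PORT B =====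
-- B: dedup loop (first-occurrence order), dict comprehension counting with query.count,
-- then a separate max loop over the values.
def calculateInvertedIndexQuery_alt (query : List String) : (List (String × Int)) × Int :=
  let seen := query.foldl (fun (s : List String) w => if s.contains w then s else s ++ [w]) []
  let counts : List (String × Int) := seen.map (fun w => (w, (PySem.List.count query w : Int)))
  let m := (counts.map (·.2)).foldl (fun m c => if c > m then c else m) 0
  (counts, m)

-- ===== PRECONDITION & SPEC =====
def Spec_calculateInvertedIndexQuery (query : List String) (out : (List (String × Int)) × Int) : Prop := out = calculateInvertedIndexQuery_alt query
instance (query : List String) (out : (List (String × Int)) × Int) : Decidable (Spec_calculateInvertedIndexQuery query out) := by unfold Spec_calculateInvertedIndexQuery; infer_instance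

-- ===== CLAIM (what is proved, stated in full; the proofs are below) =====
def Claim_equal_calculateInvertedIndexQuery : Prop := ∀ (query : List String), Dom_calculateInvertedIndexQuery query → Spec_calculateInvertedIndexQuery query (calculateInvertedIndexQuery query)

-- ===== LEMMAS AND PROOFS =====

-- A's loop step, named for the proofs.
def pvStepA (st : PySem.Dict String Int × Int) (word : String) : PySem.Dict String Int × Int :=
  let d := if st.1.contains word = false
           then st.1.insert word 1
           else st.1.insert word (st.1.getD word 0 + 1)
  let m := if d.getD word 0 > st.2 then d.getD word 0 else st.2
  (d, m)

def pvStepB (d : PySem.Dict String Int) (w : String) : PySem.Dict String Int :=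
  d.insert w (d.getD w 0 + 1)

-- Loop invariant of A: keys unique, every stored count is between 1 and m, and m is 0 or a stored count.
def pvInv (d : PySem.Dict String Int) (m : Int) : Prop :=
  d.keys.Nodup ∧ (∀ p ∈ d.items, 1 ≤ p.2 ∧ p.2 ≤ m) ∧ (m = 0 ∨ m ∈ d.values)

lemma pvGetD_nonneg (d : PySem.Dict String Int) (m : Int) (h : pvInv d m) (w : String) :
    0 ≤ d.getD w 0 := by
  cases hg : d.get? w with
  | none => simp [PySem.Dict.getD_eq_get?_getD, hg]
  | some u =>
    have hm := PySem.Dict.mem_items_of_get?_eq_some (d := d) hg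
    have := (h.2.1 _ hm).1
    simp only [PySem.Dict.getD_eq_get?_getD, hg, Option.getD_some]
    omega

lemma pvStepA_dict (d : PySem.Dict String Int) (m : Int) (w : String) :
    pvStepA (d, m) w = (pvStepB d w,
      if (pvStepB d w).getD w 0 > m then (pvStepB d w).getD w 0 else m) := by
  unfold pvStepA pvStepB
  by_cases h : d.contains w = false
  · rw [PySem.Dict.getD_of_not_contains d 0 h]
    simp [h]
  · simp [h]

lemma pvInv_step (d : PySem.Dict String Int) (m : Int) (w : String) (h : pvInv d m) :
    pvInv (pvStepB d w)
      (if (pvStepB d w).getD w 0 > m then (pvStepB d w).getD w 0 else m) := by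
  obtain ⟨hnd, hb, hm⟩ := h
  have hv : (pvStepB d w).getD w 0 = d.getD w 0 + 1 := by
    unfold pvStepB; exact PySem.Dict.getD_insert_self d w _ 0
  have hv1 : 1 ≤ d.getD w 0 + 1 := by have := pvGetD_nonneg d m ⟨hnd, hb, hm⟩ w; omega
  rw [hv]
  refine ⟨PySem.Dict.nodup_keys_insert d w _ hnd, ?_, ?_⟩
  · intro p hp
    rw [pvStepB, PySem.Dict.mem_items_insert] at hp
    rcases hp with rfl | ⟨hp, _⟩
    · constructor
      · exact hv1
      · split <;> omega
    · have := hb p hp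
      constructor
      · exact this.1
      · split <;> omega
  · right
    by_cases hgt : d.getD w 0 + 1 > m
    · simp only [hgt, if_pos]
      have : (w, d.getD w 0 + 1) ∈ (pvStepB d w).items := by
        rw [pvStepB, PySem.Dict.mem_items_insert]; exact Or.inl rfl
      exact List.mem_map.mpr ⟨_, this, rfl⟩
    · simp only [hgt, if_neg, not_false_iff]
      have hm' : m ∈ d.values := by
        rcases hm with h0 | h0
        · omega
        · exact h0
      obtain ⟨p, hp, hps⟩ := List.mem_map.mp hm'
      by_cases hpw : p.1 = w
      · exfalso
        have : d.getD w 0 = m := by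
          have : (w, m) ∈ d.items := by
            have : p = (w, m) := by
              cases p; simp_all
            rwa [this] at hp
          exact PySem.Dict.getD_of_mem_items d this hnd 0
        omega
      · have : p ∈ (pvStepB d w).items := by
          rw [pvStepB, PySem.Dict.mem_items_insert]; exact Or.inr ⟨hp, hpw⟩
        exact List.mem_map.mpr ⟨p, this, hps⟩

lemma pvFold_inv : ∀ (q : List String) (d : PySem.Dict String Int) (m : Int), pvInv d m →
    (q.foldl pvStepA (d, m)).1 = q.foldl pvStepB d
    ∧ pvInv (q.foldl pvStepA (d, m)).1 (q.foldl pvStepA (d, m)).2 := by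
  intro q
  induction q with
  | nil => intro d m h; exact ⟨rfl, h⟩
  | cons w q ih =>
    intro d m h
    have hstep := pvStepA_dict d m w
    simp only [List.foldl_cons, hstep]
    exact ih _ _ (pvInv_step d m w h)

lemma pvInv_empty : pvInv (PySem.Dict.empty : PySem.Dict String Int) 0 := by
  refine ⟨?_, ?_, Or.inl rfl⟩ <;> simp [PySem.Dict.empty, PySem.Dict.keys]

-- B's max-reduction loop: bounds and exact value under the invariant.
lemma pvFoldMax_le (l : List Int) (a m : Int) (ha : a ≤ m) (h : ∀ c ∈ l, c ≤ m) :
    l.foldl (fun acc c => if c > acc then c else acc) a ≤ m := by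
  induction l generalizing a with
  | nil => exact ha
  | cons c l ih =>
    simp only [List.foldl_cons]
    apply ih
    · have := h c (by simp)
      split <;> omega
    · intro x hx; exact h x (by simp [hx])

lemma pvLe_foldMax (l : List Int) (a : Int) :
    a ≤ l.foldl (fun acc c => if c > acc then c else acc) a := by
  induction l generalizing a with
  | nil => simp
  | cons c l ih =>
    simp only [List.foldl_cons]
    have h1 := ih (if c > a then c else a)
    have h2 : a ≤ (if c > a then c else a) := by split <;> omega
    omega

lemma pvMem_le_foldMax : ∀ (l : List Int) (a c : Int), c ∈ l →
    c ≤ l.foldl (fun acc c => if c > acc then c else acc) a := by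
  intro l
  induction l with
  | nil => intro a c hc; simp at hc
  | cons x l ih =>
    intro a c hc
    simp only [List.foldl_cons]
    rcases List.mem_cons.mp hc with rfl | hc
    · have h1 := pvLe_foldMax l (if c > a then c else a)
      have h2 : c ≤ (if c > a then c else a) := by split <;> omega
      omega
    · exact ih _ c hc

lemma pvFoldMax_inv (d : PySem.Dict String Int) (m : Int) (h : pvInv d m) :
    d.values.foldl (fun acc c => if c > acc then c else acc) 0 = m := by
  obtain ⟨hnd, hb, hm⟩ := h
  have h0m : 0 ≤ m := by
    rcases hm with h0 | h0
    · omega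
    · obtain ⟨p, hp, hps⟩ := List.mem_map.mp h0
      have := (hb p hp).1; omega
  have hub : ∀ c ∈ d.values, c ≤ m := by
    intro c hc
    obtain ⟨p, hp, hps⟩ := List.mem_map.mp hc
    have := (hb p hp).2; omega
  have hle := pvFoldMax_le d.values 0 m h0m hub
  rcases hm with h0 | h0
  · have := pvLe_foldMax d.values 0; omega
  · have := pvMem_le_foldMax d.values 0 m h0; omega

-- ===== VERDICT (by name: the statement is the Claim_ definition above) =====
theorem calculateInvertedIndexQuery_spec : Claim_equal_calculateInvertedIndexQuery := by
  intro query _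
  show calculateInvertedIndexQuery query = calculateInvertedIndexQuery_alt query
  obtain ⟨hd, hinv⟩ := pvFold_inv query PySem.Dict.empty 0 pvInv_empty
  -- A's dict is Counter(query); its items are the distinct words in first-occurrence
  -- order paired with their full-list counts — exactly B's `counts` list.
  have hcounter : query.foldl pvStepB PySem.Dict.empty = PySem.Dict.counter query :=
    PySem.Dict.foldl_insert_getD_add_one_eq_counter query
  have hseen : query.foldl (fun (s : List String) w => if s.contains w then s else s ++ [w]) []
      = PySem.Set.ofList query := rfl
  have hitems : (query.foldl pvStepA (PySem.Dict.empty, 0)).1.items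
      = (PySem.Set.ofList query).map (fun w => (w, (PySem.List.count query w : Int))) := by
    rw [hd, hcounter, PySem.Dict.items_counter]
    simp [PySem.List.count]
  have hvals : (query.foldl pvStepA (PySem.Dict.empty, 0)).1.values
      = ((PySem.Set.ofList query).map (fun w => (w, (PySem.List.count query w : Int)))).map (·.2) := by
    simp only [PySem.Dict.values, hitems]
  have hmax := pvFoldMax_inv _ _ hinv
  rw [hvals] at hmax
  show ((query.foldl pvStepA (PySem.Dict.empty, 0)).1.items,
        (query.foldl pvStepA (PySem.Dict.empty, 0)).2) = _
  unfold calculateInvertedIndexQuery_alt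
  rw [hseen, hitems, ← hmax]
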